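-- pv_equiv track=rewrite | github.com/tcotten-scrypted/persistent-stochastic-ablation-resmlp | scripts/get_asymmetric_models.py | calculate_parameter_count
-- ===== SOURCE A (Python) =====
-- def calculate_parameter_count(depth: int, width: int) -> int:
--     """
--     Calculate the total number of parameters for a given architecture.
--
--     Args:
--         depth: Number of hidden layers
--         width: Number of neurons per hidden layer
--
--     Returns:
--         Total parameter count
--     """
--     input_size = 784  # MNIST flattened
--     output_size = 10  # MNIST digits
--
--     if depth == 0:  # No hidden layers
--         return input_size * output_size + output_size  # weights + bias
--     else:
--         # Input to first hidden layer
--         param_count = input_size * width + width  # weights + bias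
--         # Hidden to hidden layers
--         for _ in range(depth - 1):
--             param_count += width * width + width  # weights + bias
--         # Last hidden to output
--         param_count += width * output_size + output_size  # weights + bias
--         return param_count
-- ===== SOURCE B (Python) =====
-- def calculate_parameter_count(depth: int, width: int) -> int:
--     """Closed form, factored: pull the common factor `width` out of every
--     weight+bias term instead of looping over the hidden-to-hidden layers."""
--     OUT = 10
--     if depth == 0:
--         return 7850  # 784*10 + 10, the direct input->output readout
--     hidden = max(depth - 1, 0)
--     # 784w + w + hidden*(w^2 + w) + 10w + 10  ==  w*(795 + hidden*(w+1)) + 10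
--     return width * (795 + hidden * (width + 1)) + OUT
-- ===== Notes on version B (the rewrite author's own statement) =====
-- stated objective: faster
-- what changed: Replaced the O(depth) loop over hidden-to-hidden layers by a factored closed form width*(795 + max(depth-1,0)*(width+1)) + 10.
import Mathlib
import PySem

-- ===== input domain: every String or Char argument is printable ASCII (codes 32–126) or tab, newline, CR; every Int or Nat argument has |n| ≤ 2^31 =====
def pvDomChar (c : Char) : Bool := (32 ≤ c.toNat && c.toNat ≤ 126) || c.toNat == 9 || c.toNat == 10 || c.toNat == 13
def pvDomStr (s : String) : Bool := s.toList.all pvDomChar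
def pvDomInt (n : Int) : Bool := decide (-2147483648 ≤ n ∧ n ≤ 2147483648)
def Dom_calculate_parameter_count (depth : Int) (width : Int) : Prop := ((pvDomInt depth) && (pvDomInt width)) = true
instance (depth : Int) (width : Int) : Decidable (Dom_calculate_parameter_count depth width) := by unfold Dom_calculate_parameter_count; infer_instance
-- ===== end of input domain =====

-- B replaces A's O(depth) accumulation loop by one factored closed-form expression (faster).

-- ===== PORT A =====
def calculate_parameter_count (depth : Int) (width : Int) : Int :=
  let input_size : Int := 784
  let output_size : Int := 10
  if depth = 0 then
    input_size * output_size + output_size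
  else
    -- param_count = input_size * width + width, then the loop, then the output layer
    let param_count := input_size * width + width
    let param_count :=
      (PySem.List.pyRange 0 (depth - 1) 1).foldl
        (fun acc _ => acc + (width * width + width)) param_count
    param_count + (width * output_size + output_size)

-- ===== PORT B =====
def calculate_parameter_count_alt (depth : Int) (width : Int) : Int :=
  let OUT : Int := 10
  if depth = 0 then 7850
  else width * (795 + (max (depth - 1) 0) * (width + 1)) + OUT

-- ===== PRECONDITION & SPEC =====
def Spec_calculate_parameter_count (depth : Int) (width : Int) (out : Int) : Prop := out = calculate_parameter_count_alt depth width
instance (depth : Int) (width : Int) (out : Int) : Decidable (Spec_calculate_parameter_count depth width out) := by unfold Spec_calculate_parameter_count; infer_instance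

-- ===== CLAIM (what is proved, stated in full; the proofs are below) =====
def Claim_equal_calculate_parameter_count : Prop := ∀ (depth : Int) (width : Int), Dom_calculate_parameter_count depth width → Spec_calculate_parameter_count depth width (calculate_parameter_count depth width)

-- ===== LEMMAS AND PROOFS =====

-- ===== VERDICT (by name: the statement is the Claim_ definition above) =====
theorem calculate_parameter_count_spec : Claim_equal_calculate_parameter_count := by
  intro depth width _
  unfold Spec_calculate_parameter_count calculate_parameter_count calculate_parameter_count_alt
  by_cases h : depth = 0
  · simp [h]
  · simp only [h, if_false]
    rw [PySem.List.foldl_add]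
    rw [PySem.List.sum_map_const_int]
    rw [PySem.List.length_pyRange_one]
    have : ((depth - 1 - 0).toNat : Int) = max (depth - 1) 0 := by omega
    simp only [this]
    ring
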